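-- pv_equiv track=rewrite | github.com/BUSOLA12/AIMathTutor | backend/scripts/evaluate_diagnosis_models.py | _binarize_label_lists
-- ===== SOURCE A (Python) =====
-- def _binarize_label_lists(label_lists: list[list[str]], label_names: list[str]) -> list[list[int]]:
--     label_index = {label: index for index, label in enumerate(label_names)}
--     matrix: list[list[int]] = []
--     for labels in label_lists:
--         row = [0] * len(label_names)
--         for label in labels:
--             if label in label_index:
--                 row[label_index[label]] = 1
--         matrix.append(row)
--     return matrix
-- ===== SOURCE B (Python) =====
-- def _binarize_label_lists(label_lists: list[list[str]], label_names: list[str]) -> list[list[int]]: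
--     return [
--         [1 if name in row_set else 0 for name in label_names]
--         for row_set in (set(labels) for labels in label_lists)
--     ]
-- ===== Notes on version B (the rewrite author's own statement) =====
-- stated objective: idiomatic
-- what changed: B drops the reverse-index dict and indexed scatter writes: each row is built by scanning label_names once and testing membership in a per-row set of labels.
-- outside the precondition, e.g. on _binarize_label_lists([['a']], ['a', 'a']): A returns [[0, 1]], B returns [[1, 1]]
import Mathlib
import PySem

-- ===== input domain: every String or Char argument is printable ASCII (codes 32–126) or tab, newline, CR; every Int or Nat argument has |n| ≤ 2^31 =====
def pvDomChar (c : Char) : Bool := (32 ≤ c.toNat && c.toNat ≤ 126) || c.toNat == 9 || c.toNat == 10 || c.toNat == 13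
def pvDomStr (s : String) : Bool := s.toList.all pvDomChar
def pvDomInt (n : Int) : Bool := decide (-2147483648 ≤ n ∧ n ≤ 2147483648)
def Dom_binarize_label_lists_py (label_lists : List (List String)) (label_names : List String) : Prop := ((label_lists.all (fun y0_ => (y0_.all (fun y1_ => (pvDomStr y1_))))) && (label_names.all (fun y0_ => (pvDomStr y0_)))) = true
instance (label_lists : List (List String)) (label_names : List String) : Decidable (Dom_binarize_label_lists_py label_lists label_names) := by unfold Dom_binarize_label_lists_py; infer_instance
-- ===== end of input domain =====

-- B replaces A's reverse-index dict + indexed scatter writes by a per-row label set scanned against label_names (idiomatic; similar cost). Equality proved for duplicate-free label_names.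


-- ===== PORT A =====
-- label_index = {label: index for index, label in enumerate(label_names)}
def pvLabelIndex (label_names : List String) : PySem.Dict String Int :=
  (PySem.List.enumerate label_names).foldl (fun d p => d.insert p.2 p.1) PySem.Dict.empty

def binarize_label_lists_py (label_lists : List (List String)) (label_names : List String) : List (List Int) :=
  let label_index := pvLabelIndex label_names
  label_lists.foldl (fun matrix labels =>
    let row := labels.foldl (fun row label =>
      if label_index.contains label then
        PySem.List.pySetD row (label_index.getD label 0) 1
      else row) (List.replicate label_names.length (0 : Int))
    matrix ++ [row]) []

-- ===== PORT B =====
def binarize_label_lists_py_alt (label_lists : List (List String)) (label_names : List String) : List (List Int) :=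
  (label_lists.map (fun labels => PySem.Set.ofList labels)).map (fun row_set =>
    label_names.map (fun name => if PySem.Set.contains row_set name then (1 : Int) else 0))

-- ===== PRECONDITION & SPEC =====
-- Pre_ excludes label_names containing duplicates: there A's dict keeps only the LAST index of a
-- duplicated name (marking one column) while B marks every duplicate column — both defensible
-- readings of an unspecified corner (indicator matrices assume distinct label names).
def Pre_binarize_label_lists_py (label_lists : List (List String)) (label_names : List String) : Prop :=
  label_names.Nodup
instance (label_lists : List (List String)) (label_names : List String) : Decidable (Pre_binarize_label_lists_py label_lists label_names) := by unfold Pre_binarize_label_lists_py; infer_instance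

def pvWitness_binarize_label_lists_py : List (List String) × List String :=
  ([["x", "z"], [], ["y", "q"]], ["x", "y", "z"])

def Spec_binarize_label_lists_py (label_lists : List (List String)) (label_names : List String) (out : List (List Int)) : Prop := out = binarize_label_lists_py_alt label_lists label_names
instance (label_lists : List (List String)) (label_names : List String) (out : List (List Int)) : Decidable (Spec_binarize_label_lists_py label_lists label_names out) := by unfold Spec_binarize_label_lists_py; infer_instance

-- ===== CLAIM (what is proved, stated in full; the proofs are below) =====
def Claim_equal_binarize_label_lists_py : Prop := ∀ (label_lists : List (List String)) (label_names : List String), Dom_binarize_label_lists_py label_lists label_names → Pre_binarize_label_lists_py label_lists label_names → Spec_binarize_label_lists_py label_lists label_names (binarize_label_lists_py label_lists label_names)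

-- ===== LEMMAS AND PROOFS =====

-- A's inner-loop body, named for the proofs (definitionally the lambda in the port).
def pvStep (names : List String) (row : List Int) (label : String) : List Int :=
  if (pvLabelIndex names).contains label then
    PySem.List.pySetD row ((pvLabelIndex names).getD label 0) 1
  else row

lemma pvLabelIndex_items (names : List String) (hnd : names.Nodup) :
    (pvLabelIndex names).items = (PySem.List.enumerate names).map (fun p => (p.2, p.1)) := by
  have h := PySem.Dict.items_foldl_insert_fresh (PySem.List.enumerate names) Prod.snd Prod.fst
      PySem.Dict.empty (by simp) (by simpa [PySem.List.map_snd_enumerate] using hnd)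
  simpa [pvLabelIndex] using h

lemma pvLabelIndex_keys_nodup (names : List String) : (pvLabelIndex names).keys.Nodup := by
  have h := PySem.Dict.nodup_keys_foldl_insert_key (PySem.List.enumerate names) Prod.snd
      (fun _ p => p.1) PySem.Dict.empty (by simp [PySem.Dict.keys_empty])
  simpa [pvLabelIndex] using h

lemma pvLabelIndex_contains (names : List String) (l : String) :
    (pvLabelIndex names).contains l = decide (l ∈ names) := by
  have h := PySem.Dict.keys_foldl_insert_key (PySem.List.enumerate names) Prod.snd
      (fun (_ : PySem.Dict String Int) p => p.1) PySem.Dict.empty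
  rw [PySem.Dict.contains_eq_decide_mem_keys]
  have hk : (pvLabelIndex names).keys = PySem.Set.update ([] : List String) names := by
    simpa [pvLabelIndex, PySem.List.map_snd_enumerate, PySem.Dict.keys_empty] using h
  simp [hk, PySem.Set.mem_update]

lemma pvLabelIndex_get? (names : List String) (hnd : names.Nodup) (l : String) (i : Int) :
    (pvLabelIndex names).get? l = some i ↔
      ∃ (k : Nat) (h : k < names.length), names[k] = l ∧ i = (k : Int) := by
  rw [PySem.Dict.get?_eq_some_iff_mem_items _ _ _ (pvLabelIndex_keys_nodup names),
      pvLabelIndex_items names hnd]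
  simp only [List.mem_map, PySem.List.mem_enumerate_iff]
  constructor
  · rintro ⟨⟨a, b⟩, ⟨k, hk, hp⟩, heq⟩
    cases hp; cases heq
    exact ⟨k, hk, rfl, by simp⟩
  · rintro ⟨k, hk, rfl, rfl⟩
    exact ⟨((k : Int), names[k]), ⟨k, hk, by simp⟩, rfl⟩

lemma pvStep_length (names : List String) (row : List Int) (label : String) :
    (pvStep names row label).length = row.length := by
  unfold pvStep; split <;> simp [PySem.List.length_pySetD]

lemma pvFold_length (names : List String) (labels : List String) (r : List Int) :
    (labels.foldl (pvStep names) r).length = r.length := by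
  induction labels generalizing r with
  | nil => rfl
  | cons l ls ih => simp [List.foldl_cons, ih, pvStep_length]

lemma pvRowLoop (names : List String) (hnd : names.Nodup)
    (labels : List String) (r : List Int) (hr : r.length = names.length)
    (j : Nat) (hj : j < names.length) :
    (labels.foldl (pvStep names) r)[j]? =
      if names[j] ∈ labels then some 1 else r[j]? := by
  induction labels generalizing r with
  | nil => simp
  | cons l ls ih =>
    rw [List.foldl_cons, ih (pvStep names r l) (by rw [pvStep_length, hr])]
    by_cases hls : names[j] ∈ ls
    · simp [hls]
    · simp only [hls, if_false, List.mem_cons, or_false]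
      unfold pvStep
      rw [pvLabelIndex_contains]
      by_cases hmem : l ∈ names
      · simp only [hmem, decide_true, if_true]
        obtain ⟨idx, hidx, hnm⟩ := List.mem_iff_getElem.mp hmem
        have hget : (pvLabelIndex names).get? l = some (idx : Int) :=
          (pvLabelIndex_get? names hnd l idx).mpr ⟨idx, hidx, hnm, rfl⟩
        rw [PySem.Dict.getD_eq_get?_getD, hget]
        simp only [Option.getD_some, PySem.List.pySetD_natCast]
        rw [List.getElem?_set]
        by_cases hj_eq : names[j] = l
        · have : idx = j := by
            have := (List.Nodup.getElem_inj_iff hnd (hi := hidx) (hj := hj))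
            exact this.mp (hnm.trans hj_eq.symm)
          simp [this, hj_eq, hr ▸ hj]
        · have : idx ≠ j := fun h => hj_eq (h ▸ hnm ▸ rfl)
          simp [this, hj_eq]
      · simp only [hmem, decide_false, Bool.false_eq_true, if_false]
        have : names[j] ≠ l := fun h => hmem (h ▸ List.getElem_mem hj)
        simp [this]

lemma pvRow_eq (names : List String) (hnd : names.Nodup) (labels : List String) :
    labels.foldl (pvStep names) (List.replicate names.length (0 : Int)) =
      names.map (fun name => if PySem.Set.contains (PySem.Set.ofList labels) name then (1 : Int) else 0) := by
  apply List.ext_getElem?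
  intro j
  by_cases hj : j < names.length
  · rw [pvRowLoop names hnd labels _ (by simp) j hj]
    by_cases hm : names[j] ∈ labels <;> simp [hm, hj]
  · have h1 : (labels.foldl (pvStep names) (List.replicate names.length (0:Int))).length ≤ j := by
      rw [pvFold_length]; simpa using Nat.le_of_not_lt hj
    rw [List.getElem?_eq_none h1, List.getElem?_eq_none (by simpa using Nat.le_of_not_lt hj)]

-- ===== VERDICT (by name: the statement is the Claim_ definition above) =====
theorem binarize_label_lists_py_spec : Claim_equal_binarize_label_lists_py := by
  intro label_lists label_names _hdom hpre
  unfold Spec_binarize_label_lists_py binarize_label_lists_py binarize_label_lists_py_alt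
  show label_lists.foldl (fun matrix labels =>
      matrix ++ [labels.foldl (pvStep label_names) (List.replicate label_names.length (0 : Int))]) [] = _
  rw [PySem.List.foldl_append_singleton_eq_map, List.map_map]
  exact List.map_congr_left fun labels _ => pvRow_eq label_names hpre labels
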